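-- pv_equiv track=rewrite | github.com/AndreiaPp/Tetris-AI | agent.py | check_complete_lines
-- ===== SOURCE A (Python) =====
-- def check_complete_lines(filled,height,width):
-- 	pieces_by_line={}
-- 	for c,l in filled:
-- 		if height-l not in pieces_by_line:
-- 			pieces_by_line[height-l]=1
-- 		else:
-- 			pieces_by_line[height-l]+=1
-- 	#return sum(value == 8 for value in pieces_by_line.values())
-- 	return sum(value == width-2 for value in pieces_by_line.values())
-- ===== SOURCE B (Python) =====
-- def check_complete_lines(filled, height, width):
--     lines = sorted(height - l for c, l in filled)
--     full = 0
--     i = 0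
--     n = len(lines)
--     while i < n:
--         j = i + 1
--         while j < n and lines[j] == lines[i]:
--             j += 1
--         if j - i == width - 2:
--             full += 1
--         i = j
--     return full
-- ===== Notes on version B (the rewrite author's own statement) =====
-- stated objective: alternative
-- what changed: Replaces A's dict tally over line keys with sorting the keys once and counting full lines in a single run-length scan (two-pointer groupby) over the sorted list, so no dict is built.
import Mathlib
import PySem

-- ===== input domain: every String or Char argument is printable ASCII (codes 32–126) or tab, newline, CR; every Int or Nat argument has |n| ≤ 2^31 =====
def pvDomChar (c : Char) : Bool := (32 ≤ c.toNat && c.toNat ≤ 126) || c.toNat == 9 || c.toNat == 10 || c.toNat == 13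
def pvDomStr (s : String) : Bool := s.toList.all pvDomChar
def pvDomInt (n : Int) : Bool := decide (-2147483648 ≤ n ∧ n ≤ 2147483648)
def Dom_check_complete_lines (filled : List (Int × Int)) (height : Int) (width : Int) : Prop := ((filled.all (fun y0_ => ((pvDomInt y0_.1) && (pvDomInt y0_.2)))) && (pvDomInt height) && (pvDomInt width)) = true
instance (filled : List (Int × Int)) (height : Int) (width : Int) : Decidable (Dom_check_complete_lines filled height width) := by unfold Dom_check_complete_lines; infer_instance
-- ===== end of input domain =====

-- B replaces A's dict tally with a sort followed by a single run-length scan over the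
-- sorted line keys (objective: alternative algorithm, similar cost).

-- ===== PORT A =====
-- the dict-tally loop, then sum(value == width-2 for value in values)
def check_complete_lines (filled : List (Int × Int)) (height : Int) (width : Int) : Int :=
  (filled.foldl (fun d p =>
    if d.contains (height - p.2) = false then d.insert (height - p.2) 1
    else d.insert (height - p.2) (d.getD (height - p.2) 0 + 1))
    PySem.Dict.empty).values.foldl
      (fun acc v => acc + (if v == width - 2 then (1 : Int) else 0)) 0

-- ===== PORT B =====
-- the outer while loop of Source B: one run of equal keys per iteration
-- (the inner `while lines[j] == lines[i]` is the takeWhile/dropWhile split)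
def cclRuns (t : Int) : List Int → Int
  | [] => 0
  | h :: rest =>
      (if ((rest.takeWhile (fun x => x == h)).length + 1 : Int) == t then 1 else 0)
        + cclRuns t (rest.dropWhile (fun x => x == h))
termination_by ys => ys.length
decreasing_by
  exact Nat.lt_succ_of_le (List.length_dropWhile_le _ _)

def check_complete_lines_alt (filled : List (Int × Int)) (height : Int) (width : Int) : Int :=
  cclRuns (width - 2) (PySem.List.sorted (filled.map (fun p => height - p.2)) (fun x => x) false)

-- ===== PRECONDITION & SPEC =====
def Spec_check_complete_lines (filled : List (Int × Int)) (height : Int) (width : Int) (out : Int) : Prop := out = check_complete_lines_alt filled height width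
instance (filled : List (Int × Int)) (height : Int) (width : Int) (out : Int) : Decidable (Spec_check_complete_lines filled height width out) := by unfold Spec_check_complete_lines; infer_instance

-- ===== CLAIM (what is proved, stated in full; the proofs are below) =====
def Claim_equal_check_complete_lines : Prop := ∀ (filled : List (Int × Int)) (height : Int) (width : Int), Dom_check_complete_lines filled height width → Spec_check_complete_lines filled height width (check_complete_lines filled height width)

-- ===== LEMMAS AND PROOFS =====

-- indicator and the common "sum over distinct keys of indicator(count)" form
def cclInd (t c : Int) : Int := if c == t then 1 else 0
def cclF (t : Int) (ys : List Int) : Int :=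
  ((PySem.Set.ofList ys).map (fun k => cclInd t ((ys.count k : Nat) : Int))).sum

lemma ccl_sum_map_congr (f : Int → Int) (l₁ l₂ : List Int)
    (h₁ : l₁.Nodup) (h₂ : l₂.Nodup) (hm : ∀ a, a ∈ l₁ ↔ a ∈ l₂) :
    (l₁.map f).sum = (l₂.map f).sum := by
  have hp : l₁.Perm l₂ := (List.perm_ext_iff_of_nodup h₁ h₂).2 hm
  exact (hp.map f).sum_eq

lemma ccl_foldl_sum (t : Int) (l : List Int) (acc : Int) :
    l.foldl (fun a v => a + cclInd t v) acc = acc + (l.map (cclInd t)).sum := by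
  induction l generalizing acc with
  | nil => simp
  | cons x xs ih =>
    rw [List.foldl_cons, ih, List.map_cons, List.sum_cons]; ring

-- A's value is cclF of the key list
lemma ccl_A_eq (filled : List (Int × Int)) (height width : Int) :
    check_complete_lines filled height width
      = cclF (width - 2) (filled.map (fun p => height - p.2)) := by
  unfold check_complete_lines
  have hstep : (fun (d : PySem.Dict Int Int) (p : Int × Int) =>
      if d.contains (height - p.2) = false then d.insert (height - p.2) 1
      else d.insert (height - p.2) (d.getD (height - p.2) 0 + 1))
      = fun d p => d.insert (height - p.2) (d.getD (height - p.2) 0 + 1) := by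
    funext d p
    by_cases h : d.contains (height - p.2) = false
    · rw [if_pos h, PySem.Dict.getD_of_not_contains _ _ h]; norm_num
    · rw [if_neg h]
  rw [hstep]
  have hfold : filled.foldl
      (fun (d : PySem.Dict Int Int) p => d.insert (height - p.2) (d.getD (height - p.2) 0 + 1))
      PySem.Dict.empty
      = PySem.Dict.counter (filled.map (fun p => height - p.2)) := by
    rw [← PySem.Dict.foldl_insert_getD_add_one_eq_counter, List.foldl_map]
  rw [hfold]
  have hvals : (PySem.Dict.counter (filled.map (fun p => height - p.2))).values
      = (PySem.Set.ofList (filled.map (fun p => height - p.2))).map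
          (fun k => (((filled.map (fun p => height - p.2)).count k : Nat) : Int)) := by
    simp only [PySem.Dict.values, PySem.Dict.items_counter, List.map_map]
    rfl
  rw [hvals]
  rw [show (fun (acc v : Int) => acc + (if v == width - 2 then (1:Int) else 0))
        = fun acc v => acc + cclInd (width - 2) v from rfl]
  rw [ccl_foldl_sum]
  simp [cclF, List.map_map]
  rfl

-- structure of a sorted (Pairwise ≤) list: the head's run of equal keys, then the rest
lemma ccl_runs_eq (t : Int) (ys : List Int) :
    ys.Pairwise (· ≤ ·) → cclRuns t ys = cclF t ys := by
  induction ys using cclRuns.induct with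
  | case1 =>
    intro _
    rw [cclRuns]
    unfold cclF
    simp [PySem.Set.ofList]
  | case2 h rest ih =>
    intro hs
    have hsplit := List.takeWhile_append_dropWhile (p := fun x => x == h) (l := rest)
    set tw := rest.takeWhile (fun x => x == h) with htw
    set dw := rest.dropWhile (fun x => x == h) with hdw
    have htw_mem : ∀ x ∈ tw, x = h := by
      intro x hx
      have := List.mem_takeWhile_imp hx
      simpa using this
    have hrest_pw : rest.Pairwise (· ≤ ·) := (List.pairwise_cons.1 hs).2
    have hhead_le : ∀ x ∈ rest, h ≤ x := (List.pairwise_cons.1 hs).1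
    have hdw_sub : dw.Sublist rest := List.dropWhile_sublist _
    have hdw_pw : dw.Pairwise (· ≤ ·) := hrest_pw.sublist hdw_sub
    have hh_not_dw : h ∉ dw := by
      intro hmem
      have hne : dw ≠ [] := List.ne_nil_of_mem hmem
      obtain ⟨d0, dt, hcons⟩ : ∃ d0 dt, dw = d0 :: dt := by
        cases hdwc : dw with
        | nil => exact absurd hdwc hne
        | cons x xs => exact ⟨x, xs, rfl⟩
      have hhead : (d0 == h) = false := by
        have := List.head_dropWhile_not (fun x => x == h) (l := rest) (by rwa [← hdw])
        simp only [← hdw, hcons, List.head_cons] at this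
        exact this
      have hd0ne : d0 ≠ h := by simpa using hhead
      have hd0mem : d0 ∈ rest := hdw_sub.mem (by rw [hcons]; exact List.mem_cons_self ..)
      have hle : h ≤ d0 := hhead_le _ hd0mem
      rw [hcons] at hmem hdw_pw
      rcases List.mem_cons.1 hmem with hc | hc
      · exact hd0ne hc.symm
      · have hge : d0 ≤ h := (List.pairwise_cons.1 hdw_pw).1 _ hc
        exact hd0ne (le_antisymm hge hle)
    -- counts in h :: rest
    have hcount_h : (h :: rest).count h = tw.length + 1 := by
      have h1 : tw.count h = tw.length := by
        rw [List.count_eq_length]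
        intro x hx; exact ((htw_mem x hx).symm ▸ rfl)
      have h2 : dw.count h = 0 := List.count_eq_zero.2 hh_not_dw
      rw [List.count_cons_self, ← hsplit, List.count_append, h1, h2]
    have hcount_ne : ∀ k, k ≠ h → (h :: rest).count k = dw.count k := by
      intro k hk
      have h1 : tw.count k = 0 := by
        rw [List.count_eq_zero]; intro hx; exact hk (htw_mem _ hx)
      have hkh : (h == k) = false := by simpa using fun hc => hk hc.symm
      rw [List.count_cons, ← hsplit, List.count_append, h1, hkh]
      simp
    -- the distinct elements of h :: rest are h plus the distinct elements of dw
    have hmem_iff : ∀ a, a ∈ PySem.Set.ofList (h :: rest) ↔ a ∈ h :: PySem.Set.ofList dw := by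
      intro a
      simp only [PySem.Set.mem_ofList, List.mem_cons]
      constructor
      · rintro (rfl | ha)
        · exact Or.inl rfl
        · rw [← hsplit, List.mem_append] at ha
          rcases ha with ha | ha
          · exact Or.inl (htw_mem _ ha)
          · exact Or.inr ha
      · rintro (rfl | ha)
        · exact Or.inl rfl
        · exact Or.inr (by rw [← hsplit]; exact List.mem_append.2 (Or.inr ha))
    have hF : cclF t (h :: rest)
        = cclInd t (((h :: rest).count h : Nat) : Int)
          + ((PySem.Set.ofList dw).map (fun k => cclInd t (((h :: rest).count k : Nat) : Int))).sum := by
      unfold cclF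
      rw [ccl_sum_map_congr _ _ (h :: PySem.Set.ofList dw)
        (PySem.Set.nodup_ofList _)
        (List.nodup_cons.2 ⟨fun hc => hh_not_dw ((PySem.Set.mem_ofList _ _).1 hc), PySem.Set.nodup_ofList _⟩)
        hmem_iff]
      simp
    have hmap_eq : ((PySem.Set.ofList dw).map (fun k => cclInd t (((h :: rest).count k : Nat) : Int)))
        = ((PySem.Set.ofList dw).map (fun k => cclInd t ((dw.count k : Nat) : Int))) := by
      apply List.map_congr_left
      intro k hk
      have hkne : k ≠ h := fun hc => hh_not_dw (hc ▸ (PySem.Set.mem_ofList _ _).1 hk)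
      rw [hcount_ne k hkne]
    rw [cclRuns, ih hdw_pw, hF, hmap_eq, hcount_h]
    have hcast : (((tw.length : Nat) : Int) + 1) = (((tw.length + 1 : Nat)) : Int) := by push_cast; ring
    unfold cclF cclInd
    rw [← hcast]

-- cclF is invariant under permutation of the underlying list
lemma ccl_F_perm (t : Int) (xs ys : List Int) (hp : xs.Perm ys) : cclF t xs = cclF t ys := by
  unfold cclF
  have hc : ∀ k, xs.count k = ys.count k := fun k => hp.count_eq k
  have : (fun k => cclInd t ((xs.count k : Nat) : Int)) = (fun k => cclInd t ((ys.count k : Nat) : Int)) := by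
    funext k; rw [hc]
  rw [this]
  exact ccl_sum_map_congr _ _ _ (PySem.Set.nodup_ofList _) (PySem.Set.nodup_ofList _)
    (fun a => by rw [PySem.Set.mem_ofList, PySem.Set.mem_ofList]; exact ⟨fun h => hp.mem_iff.1 h, fun h => hp.mem_iff.2 h⟩)

-- ===== VERDICT (by name: the statement is the Claim_ definition above) =====
theorem check_complete_lines_spec : Claim_equal_check_complete_lines := by
  intro filled height width _
  unfold Spec_check_complete_lines check_complete_lines_alt
  rw [ccl_A_eq]
  have hs := PySem.List.sorted_pairwise (xs := filled.map (fun p => height - p.2)) (key := fun x => x)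
  rw [ccl_runs_eq _ _ hs]
  exact ccl_F_perm _ _ _ (PySem.List.sorted_perm _ _ _).symm
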